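-- pv_equiv track=rewrite | github.com/Sentient-X/forge | forge/formats/mcap/episode_split.py | split_marker
-- ===== SOURCE A (Python) =====
-- from bisect import bisect_left
--
-- def split_marker(
--     primary_ts_ns: list[int], marker_ts_ns: list[int]
-- ) -> list[tuple[int, int]]:
--     """Each marker timestamp begins a new episode at the next primary frame.
--
--     Markers before the first primary timestamp are treated as start-of-stream;
--     markers after the last as end-of-stream.
--     """
--     if not primary_ts_ns:
--         return []
--     if not marker_ts_ns:
--         return [(0, len(primary_ts_ns))]
--     cuts = sorted({bisect_left(primary_ts_ns, t) for t in marker_ts_ns})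
--     cuts = [c for c in cuts if 0 < c < len(primary_ts_ns)]
--     boundaries = [0] + cuts + [len(primary_ts_ns)]
--     return list(zip(boundaries[:-1], boundaries[1:]))
-- ===== SOURCE B (Python) =====
-- def split_marker(
--     primary_ts_ns: list[int], marker_ts_ns: list[int]
-- ) -> list[tuple[int, int]]:
--     """Two-pointer rewrite: walk a sorted copy of the primary timestamps once,
--     in step with the markers in increasing order; the walk position at each
--     marker is its cut (the number of primary timestamps below it).  Interior
--     cuts are filtered before dedup, and episodes are emitted with a running
--     'prev' boundary, which also makes the empty-marker branch unnecessary."""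
--     if not primary_ts_ns:
--         return []
--     n = len(primary_ts_ns)
--     ps = sorted(primary_ts_ns)
--     cutset = set()
--     i = 0
--     for t in sorted(marker_ts_ns):
--         while i < n and ps[i] < t:
--             i += 1
--         if 0 < i < n:
--             cutset.add(i)
--     prev, out = 0, []
--     for c in sorted(cutset):
--         out.append((prev, c))
--         prev = c
--     out.append((prev, n))
--     return out
-- ===== Notes on version B (the rewrite author's own statement) =====
-- stated objective: alternative
-- what changed: B replaces the per-marker bisect binary search by a single two-pointer walk over a sorted copy of the primary timestamps in step with the sorted markers, filters interior cuts before set-dedup rather than after sorting, drops the empty-marker special case, and emits episode pairs with a running previous-boundary fold instead of zipping two shifted slices.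
-- outside the precondition, e.g. on split_marker([3, 1, 2], [2]): A returns [(0, 2), (2, 3)], B returns [(0, 1), (1, 3)]
import Mathlib
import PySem

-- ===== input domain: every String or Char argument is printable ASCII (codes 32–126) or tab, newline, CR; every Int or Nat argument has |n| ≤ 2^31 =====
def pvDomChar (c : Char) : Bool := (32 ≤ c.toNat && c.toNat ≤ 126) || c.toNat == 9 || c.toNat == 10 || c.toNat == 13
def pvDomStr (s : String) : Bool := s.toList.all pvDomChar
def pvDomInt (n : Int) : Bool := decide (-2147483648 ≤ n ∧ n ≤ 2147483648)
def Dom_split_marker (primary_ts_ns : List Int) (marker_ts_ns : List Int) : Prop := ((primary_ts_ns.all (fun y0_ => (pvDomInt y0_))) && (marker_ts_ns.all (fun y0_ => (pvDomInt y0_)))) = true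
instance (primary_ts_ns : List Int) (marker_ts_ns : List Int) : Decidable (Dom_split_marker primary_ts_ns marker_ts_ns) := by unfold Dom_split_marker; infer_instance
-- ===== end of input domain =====

-- B replaces per-marker bisect binary search by one two-pointer walk over a sorted
-- copy of the primary timestamps in step with the sorted markers (filtering interior
-- cuts before dedup) and emits episode pairs with a running previous boundary instead
-- of zipping shifted slices: an alternative decomposition of the same task.


-- ===== PORT A =====
def split_marker (primary_ts_ns : List Int) (marker_ts_ns : List Int) : List (Int × Int) :=
  if primary_ts_ns = [] then []
  else if marker_ts_ns = [] then [((0 : Int), (primary_ts_ns.length : Int))]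
  else
    let cuts0 : List Int :=
      PySem.List.sorted
        (PySem.Set.ofList
          (marker_ts_ns.map (fun t => ((PySem.List.bisectLeft primary_ts_ns t : Nat) : Int))))
        (fun c => c)
    let cuts : List Int :=
      cuts0.filter (fun c => decide (0 < c) && decide (c < (primary_ts_ns.length : Int)))
    let boundaries : List Int := 0 :: (cuts ++ [(primary_ts_ns.length : Int)])
    boundaries.dropLast.zip boundaries.tail

-- ===== PORT B =====
-- the inner 'while i < n and ps[i] < t: i += 1' loop of Source B
def pvAdvance (ps : List Int) (t : Int) (i : Nat) : Nat :=
  if h : i < ps.length then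
    if ps[i] < t then pvAdvance ps t (i + 1) else i
  else i
termination_by ps.length - i

def split_marker_alt (primary_ts_ns : List Int) (marker_ts_ns : List Int) : List (Int × Int) :=
  if primary_ts_ns = [] then []
  else
    let n : Int := (primary_ts_ns.length : Int)
    let ps : List Int := PySem.List.sorted primary_ts_ns (fun x => x)
    let st0 : Nat × PySem.Set Int :=
      (PySem.List.sorted marker_ts_ns (fun t => t)).foldl
        (fun (st : Nat × PySem.Set Int) t =>
          let i := pvAdvance ps t st.1
          (i, if 0 < (i : Int) ∧ (i : Int) < n then PySem.Set.add st.2 (i : Int) else st.2))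
        (0, PySem.Set.empty)
    let st : Int × List (Int × Int) :=
      (PySem.List.sorted st0.2 (fun c => c)).foldl
        (fun st c => (c, st.2 ++ [(st.1, c)])) ((0 : Int), [])
    st.2 ++ [(st.1, n)]

-- ===== PRECONDITION & SPEC =====
-- Pre_ excludes unsorted primary_ts_ns (when both lists are nonempty), on which
-- bisect_left's binary-search result (and hence A's value) is an accident of
-- probing order — bisect's documented precondition is a sorted list.
def Pre_split_marker (primary_ts_ns : List Int) (marker_ts_ns : List Int) : Prop :=
  primary_ts_ns = [] ∨ marker_ts_ns = [] ∨ List.Pairwise (· ≤ ·) primary_ts_ns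
instance (primary_ts_ns : List Int) (marker_ts_ns : List Int) : Decidable (Pre_split_marker primary_ts_ns marker_ts_ns) := by unfold Pre_split_marker; infer_instance

def pvWitness_split_marker : List Int × List Int := ([1, 2, 2, 5], [2, 7])

def Spec_split_marker (primary_ts_ns : List Int) (marker_ts_ns : List Int) (out : List (Int × Int)) : Prop := out = split_marker_alt primary_ts_ns marker_ts_ns
instance (primary_ts_ns : List Int) (marker_ts_ns : List Int) (out : List (Int × Int)) : Decidable (Spec_split_marker primary_ts_ns marker_ts_ns out) := by unfold Spec_split_marker; infer_instance

-- ===== CLAIM (what is proved, stated in full; the proofs are below) =====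
def Claim_equal_split_marker : Prop := ∀ (primary_ts_ns : List Int) (marker_ts_ns : List Int), Dom_split_marker primary_ts_ns marker_ts_ns → Pre_split_marker primary_ts_ns marker_ts_ns → Spec_split_marker primary_ts_ns marker_ts_ns (split_marker primary_ts_ns marker_ts_ns)

-- ===== LEMMAS AND PROOFS =====

-- a list with an order-respecting cutpoint k has exactly k elements < x
theorem countP_eq_of_cutpoint (l : List Int) (x : Int) (k : Nat) (hk : k ≤ l.length)
    (h1 : ∀ (j : Nat) (hj : j < l.length), j < k → l[j] < x)
    (h2 : ∀ (j : Nat) (hj : j < l.length), k ≤ j → x ≤ l[j]) :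
    l.countP (fun a => decide (a < x)) = k := by
  induction l generalizing k with
  | nil => simpa using (Nat.le_zero.mp hk).symm
  | cons a t ih =>
    cases k with
    | zero =>
      have : ∀ b ∈ a :: t, ¬ (b < x) := by
        intro b hb
        rcases List.mem_iff_getElem.mp hb with ⟨j, hj, rfl⟩
        exact not_lt.mpr (h2 j hj (Nat.zero_le j))
      rw [List.countP_eq_zero.mpr]
      intro b hb
      simpa using this b hb
    | succ k' =>
      have ha : a < x := h1 0 (by simp) (Nat.succ_pos k')
      have ht : t.countP (fun a => decide (a < x)) = k' := by
        apply ih k' (by simpa using hk)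
        · intro j hj hjk
          have := h1 (j + 1) (by simpa using Nat.succ_lt_succ hj) (Nat.succ_lt_succ hjk)
          simpa using this
        · intro j hj hjk
          have := h2 (j + 1) (by simpa using Nat.succ_lt_succ hj) (Nat.succ_le_succ hjk)
          simpa using this
      simp [ha, ht]

-- on a sorted list, bisect_left x is the number of elements < x
theorem bisect_eq_countP (l : List Int) (x : Int) (hs : List.Pairwise (· ≤ ·) l) :
    PySem.List.bisectLeft l x = l.countP (fun a => decide (a < x)) := by
  obtain ⟨hle, h1, h2⟩ := PySem.List.bisectLeft_spec l x hs
  exact (countP_eq_of_cutpoint l x _ hle h1 h2).symm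

-- the two-pointer advance, started at or below the cutpoint, stops at the cutpoint
theorem pvAdvance_eq (ps : List Int) (t : Int) (k : Nat) (hk : k ≤ ps.length)
    (h1 : ∀ (j : Nat) (hj : j < ps.length), j < k → ps[j] < t)
    (h2 : ∀ (j : Nat) (hj : j < ps.length), k ≤ j → t ≤ ps[j]) :
    ∀ (i : Nat), i ≤ k → pvAdvance ps t i = k := by
  intro i hik
  unfold pvAdvance
  by_cases h : i < ps.length
  · by_cases hlt : ps[i] < t
    · have hik' : i < k := by
        by_contra hge
        exact absurd (h2 i h (le_of_not_gt hge)) (not_le.mpr hlt)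
      simp only [h, dif_pos, hlt, if_pos]
      exact pvAdvance_eq ps t k hk h1 h2 (i + 1) hik'
    · have : k ≤ i := by
        by_contra hlt'
        exact hlt (h1 i h (lt_of_not_ge hlt'))
      simp only [h, dif_pos, hlt, if_neg, not_false_iff]
      omega
  · simp only [h, dif_neg, not_false_iff]
    omega
termination_by i => ps.length - i

-- on a sorted list, advance from any position ≤ countP(<t) computes countP(<t)
theorem pvAdvance_eq_countP (ps : List Int) (t : Int) (hs : List.Pairwise (· ≤ ·) ps)
    (i : Nat) (hik : i ≤ ps.countP (fun a => decide (a < t))) :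
    pvAdvance ps t i = ps.countP (fun a => decide (a < t)) := by
  obtain ⟨hle, h1, h2⟩ := PySem.List.bisectLeft_spec ps t hs
  rw [← bisect_eq_countP ps t hs] at hik ⊢
  exact pvAdvance_eq ps t _ hle h1 h2 i hik

-- walking the (sorted) markers in increasing order, the set component of B's fold
-- is the conditional add of countP(<t) for each marker
theorem walk_set_eq (ps : List Int) (hs : List.Pairwise (· ≤ ·) ps) (n : Int) :
    ∀ (ts : List Int), List.Pairwise (· ≤ ·) ts →
    ∀ (i0 : Nat) (s : PySem.Set Int),
      (∀ t ∈ ts, i0 ≤ ps.countP (fun a => decide (a < t))) →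
      (ts.foldl
        (fun (st : Nat × PySem.Set Int) t =>
          let i := pvAdvance ps t st.1
          (i, if 0 < (i : Int) ∧ (i : Int) < n then PySem.Set.add st.2 (i : Int) else st.2))
        (i0, s)).2
      = ts.foldl
          (fun (s : PySem.Set Int) t =>
            let c : Int := (ps.countP (fun a => decide (a < t)) : Nat)
            if 0 < c ∧ c < n then PySem.Set.add s c else s) s := by
  intro ts
  induction ts with
  | nil => intro _ i0 s _; rfl
  | cons t ts ih =>
    intro hpw i0 s h0
    have hadv : pvAdvance ps t i0 = ps.countP (fun a => decide (a < t)) :=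
      pvAdvance_eq_countP ps t hs i0 (h0 t (List.mem_cons_self))
    simp only [List.foldl_cons, hadv]
    apply ih hpw.of_cons
    intro u hu
    have htu : t ≤ u := (List.pairwise_cons.mp hpw).1 u hu
    exact List.countP_mono_left (fun a _ ha => by
      simp only [decide_eq_true_eq] at ha ⊢; exact lt_of_lt_of_le ha htu)

-- a conditional-add fold builds the set of the filtered mapped values
theorem foldl_condAdd (m : List Int) (f : Int → Int) (pred : Int → Prop)
    [DecidablePred pred] (s : PySem.Set Int) :
    m.foldl (fun (s : PySem.Set Int) t => if pred (f t) then PySem.Set.add s (f t) else s) s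
      = ((m.map f).filter (fun c => decide (pred c))).foldl PySem.Set.add s := by
  induction m generalizing s with
  | nil => rfl
  | cons t ts ih =>
    by_cases h : pred (f t) <;> simp [h, ih]

-- sort-of-set of a filtered list = filter of the sort-of-set (up to list membership)
theorem filter_sorted_ofList (L L' : List Int) (hmem : ∀ x, x ∈ L' ↔ x ∈ L)
    (pred : Int → Bool) :
    PySem.List.sorted (PySem.Set.ofList (L'.filter pred)) (fun c => c)
      = (PySem.List.sorted (PySem.Set.ofList L) (fun c => c)).filter pred := by
  apply PySem.List.sorted_eq_of_perm_of_pairwise_lt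
  · have hn1 : ((PySem.List.sorted (PySem.Set.ofList L) (fun c => c)).filter pred).Nodup := by
      apply List.Nodup.filter
      exact ((PySem.List.sorted_ofList_pairwise_lt L).imp (fun h => ne_of_lt h))
    have hn2 : (PySem.Set.ofList (L'.filter pred) : List Int).Nodup :=
      PySem.Set.nodup_ofList _
    refine (List.perm_ext_iff_of_nodup hn1 hn2).mpr ?_
    intro a
    simp [List.mem_filter, PySem.Set.mem_ofList, PySem.List.mem_sorted, hmem, and_comm]
  · exact List.Pairwise.filter _ (PySem.List.sorted_ofList_pairwise_lt L)

theorem dropLast_boundaries (cs : List Int) (n : Int) :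
    ((0 : Int) :: (cs ++ [n])).dropLast = (0 : Int) :: cs := by
  rw [← List.cons_append, List.dropLast_concat]

-- B's prev/append fold equals zipping consecutive boundaries
theorem foldl_pairs (cuts : List Int) (prev n : Int) (acc : List (Int × Int)) :
    (let st := cuts.foldl (fun (st : Int × List (Int × Int)) c => (c, st.2 ++ [(st.1, c)])) (prev, acc)
     st.2 ++ [(st.1, n)])
      = acc ++ (prev :: cuts).zip (cuts ++ [n]) := by
  induction cuts generalizing prev acc with
  | nil => simp
  | cons c cs ih =>
    simpa [List.foldl_cons] using ih c (acc ++ [(prev, c)])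

-- ===== VERDICT (by name: the statement is the Claim_ definition above) =====
theorem split_marker_spec : Claim_equal_split_marker := by
  intro p m _ hpre
  unfold Spec_split_marker split_marker split_marker_alt
  by_cases hp : p = []
  · simp [hp]
  · simp only [hp, if_false]
    by_cases hm : m = []
    · simp [hm, show (PySem.List.sorted ([] : List Int) (fun c => c)) = [] from rfl]
    · simp only [hm, if_false]
      have hsorted : List.Pairwise (· ≤ ·) p := by
        rcases hpre with h | h | h
        · exact absurd h hp
        · exact absurd h hm
        · exact h
      -- the sorted copy of p is p itself (p is sorted on Pre_)
      have hps : PySem.List.sorted p (fun x => x) = p :=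
        PySem.List.sorted_eq_self_of_pairwise p (fun x => x) hsorted
      rw [hps]
      -- B's two-pointer walk computes countP(<t) per (sorted) marker
      rw [walk_set_eq p hsorted (p.length : Int) (PySem.List.sorted m (fun t => t))
            (PySem.List.sorted_pairwise m (fun t => t)) 0 PySem.Set.empty
            (fun t _ => Nat.zero_le _)]
      -- A's bisect computes countP(<t) per marker
      have hmap : m.map (fun t => ((PySem.List.bisectLeft p t : Nat) : Int))
          = m.map (fun t => ((p.countP (fun x => decide (x < t)) : Nat) : Int)) := by
        apply List.map_congr_left
        intro t _
        rw [bisect_eq_countP p t hsorted]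
      rw [hmap]
      rw [foldl_pairs]
      rw [show (PySem.Set.empty : PySem.Set Int) = ([] : List Int) from rfl]
      rw [foldl_condAdd (PySem.List.sorted m (fun t => t))
            (fun t => ((p.countP (fun x => decide (x < t)) : Nat) : Int))
            (fun c => 0 < c ∧ c < (p.length : Int)) []]
      rw [show ∀ (L : List Int), L.foldl PySem.Set.add [] = PySem.Set.ofList L from
            fun L => (PySem.Set.ofList_eq_foldl L).symm]
      rw [filter_sorted_ofList
            (m.map (fun t => ((p.countP (fun x => decide (x < t)) : Nat) : Int)))
            ((PySem.List.sorted m (fun t => t)).map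
              (fun t => ((p.countP (fun x => decide (x < t)) : Nat) : Int)))
            (by intro x; simp [PySem.List.mem_sorted])]
      have hfun : (fun c => decide (0 < c ∧ c < (p.length : Int)))
          = (fun c => decide (0 < c) && decide (c < (p.length : Int))) := by
        funext c
        by_cases h1 : (0 : Int) < c <;> by_cases h2 : c < (p.length : Int) <;> simp [h1, h2]
      rw [hfun]
      simp [dropLast_boundaries]
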